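-- pv_equiv track=rewrite | github.com/liav25/sketchflow | backend/app/services/agents/mermaid_generation_agent.py | _detect_diagram_type
-- ===== SOURCE A (Python) =====
-- def _detect_diagram_type(description: str, instructions: str) -> str:
--     """Detect the most appropriate Mermaid diagram type based on content."""
--     content = (description + " " + instructions).lower()
--
--     # Sequence diagram indicators
--     if any(word in content for word in ['sequence', 'interaction', 'message', 'actor', 'participant']):
--         return 'sequenceDiagram'
--
--     # Class diagram indicators
--     if any(word in content for word in ['class', 'inheritance', 'method', 'attribute', 'relationship']):
--         return 'classDiagram'
--
--     # State diagram indicators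
--     if any(word in content for word in ['state', 'transition', 'status', 'condition']):
--         return 'stateDiagram-v2'
--
--     # Gantt chart indicators
--     if any(word in content for word in ['gantt', 'timeline', 'schedule', 'project', 'task']):
--         return 'gantt'
--
--     # Default to flowchart for most cases
--     return 'flowchart TD'
-- ===== SOURCE B (Python) =====
-- # B: flat keyword->priority map, one pass over all keywords keeping the minimum
-- # matched priority; the answer is an indexed lookup into the type table.
-- _KEYWORD_PRIORITY = {
--     'sequence': 0, 'interaction': 0, 'message': 0, 'actor': 0, 'participant': 0,
--     'class': 1, 'inheritance': 1, 'method': 1, 'attribute': 1, 'relationship': 1,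
--     'state': 2, 'transition': 2, 'status': 2, 'condition': 2,
--     'gantt': 3, 'timeline': 3, 'schedule': 3, 'project': 3, 'task': 3,
-- }
-- _TYPES = ('sequenceDiagram', 'classDiagram', 'stateDiagram-v2', 'gantt', 'flowchart TD')
--
--
-- def _detect_diagram_type(description: str, instructions: str) -> str:
--     content = (description + " " + instructions).lower()
--     best = 4  # index of the default 'flowchart TD'
--     for word, prio in _KEYWORD_PRIORITY.items():
--         if prio < best and word in content:
--             best = prio
--     return _TYPES[best]
-- ===== Notes on version B (the rewrite author's own statement) =====
-- stated objective: alternative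
-- what changed: Instead of four short-circuiting category branches, B scans one flat keyword-to-priority map in a single accumulator pass, keeping the minimum matched priority, and indexes a type table with it; correctness holds because the categories are checked in priority order in A, so A's first matching category is exactly the minimum-priority matching keyword.
import Mathlib
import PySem

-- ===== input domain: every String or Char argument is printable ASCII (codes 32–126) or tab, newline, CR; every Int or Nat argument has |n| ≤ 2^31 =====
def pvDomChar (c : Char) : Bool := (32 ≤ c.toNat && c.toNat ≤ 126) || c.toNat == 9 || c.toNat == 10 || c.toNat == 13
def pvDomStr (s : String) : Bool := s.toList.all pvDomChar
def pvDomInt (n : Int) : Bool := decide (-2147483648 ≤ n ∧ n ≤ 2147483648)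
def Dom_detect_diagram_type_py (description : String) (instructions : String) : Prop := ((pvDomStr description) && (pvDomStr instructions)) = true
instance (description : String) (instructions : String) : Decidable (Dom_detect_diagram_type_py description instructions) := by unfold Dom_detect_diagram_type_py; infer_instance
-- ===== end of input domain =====

-- B replaces A's four short-circuiting category branches by a single min-priority
-- accumulator pass over a flat keyword->priority map, then indexes a type table.


-- ===== PORT A =====
-- Port of A: lowercased concatenation, then four sequential if-branches with keyword lists.
def detect_diagram_type_py (description : String) (instructions : String) : String :=
  let content := PySem.Str.lower (description ++ " " ++ instructions)
  if ["sequence", "interaction", "message", "actor", "participant"].any (fun w => PySem.Str.isIn w content) then "sequenceDiagram"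
  else if ["class", "inheritance", "method", "attribute", "relationship"].any (fun w => PySem.Str.isIn w content) then "classDiagram"
  else if ["state", "transition", "status", "condition"].any (fun w => PySem.Str.isIn w content) then "stateDiagram-v2"
  else if ["gantt", "timeline", "schedule", "project", "task"].any (fun w => PySem.Str.isIn w content) then "gantt"
  else "flowchart TD"

-- ===== PORT B =====
-- flat keyword -> priority map, in Source B's dict insertion order
def pvKeywordPriority : List (String × Int) :=
  [("sequence", 0), ("interaction", 0), ("message", 0), ("actor", 0), ("participant", 0),
   ("class", 1), ("inheritance", 1), ("method", 1), ("attribute", 1), ("relationship", 1),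
   ("state", 2), ("transition", 2), ("status", 2), ("condition", 2),
   ("gantt", 3), ("timeline", 3), ("schedule", 3), ("project", 3), ("task", 3)]

def pvTypes : List String :=
  ["sequenceDiagram", "classDiagram", "stateDiagram-v2", "gantt", "flowchart TD"]

-- loop body: keep the smaller priority when the keyword occurs in content
def pvStep (content : String) (best : Int) (wp : String × Int) : Int :=
  if wp.2 < best && PySem.Str.isIn wp.1 content then wp.2 else best

def detect_diagram_type_py_alt (description : String) (instructions : String) : String :=
  let content := PySem.Str.lower (description ++ " " ++ instructions)
  let best := pvKeywordPriority.foldl (pvStep content) 4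
  -- best is always 0..4, so the lookup never misses; "" is unreachable
  (PySem.List.pyGet? pvTypes best).getD ""

-- ===== PRECONDITION & SPEC =====
def Spec_detect_diagram_type_py (description : String) (instructions : String) (out : String) : Prop := out = detect_diagram_type_py_alt description instructions
instance (description : String) (instructions : String) (out : String) : Decidable (Spec_detect_diagram_type_py description instructions out) := by unfold Spec_detect_diagram_type_py; infer_instance

-- ===== CLAIM (what is proved, stated in full; the proofs are below) =====
def Claim_equal_detect_diagram_type_py : Prop := ∀ (description : String) (instructions : String), Dom_detect_diagram_type_py description instructions → Spec_detect_diagram_type_py description instructions (detect_diagram_type_py description instructions)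

-- ===== LEMMAS AND PROOFS =====

-- if the priority cannot improve the accumulator, a same-priority group leaves it unchanged
theorem pvFold_stay (content : String) (p b : Int) (hb : ¬ p < b) :
    ∀ ws : List String, (ws.map (fun w => (w, p))).foldl (pvStep content) b = b := by
  intro ws
  induction ws with
  | nil => rfl
  | cons w ws ih =>
      simp only [List.map, List.foldl, pvStep]
      rw [if_neg (by simp [hb]), ih]

-- folding one priority group: result is p iff p improves b and some keyword matches
theorem pvFold_group (content : String) (p b : Int) (ws : List String) :
    (ws.map (fun w => (w, p))).foldl (pvStep content) b
      = if p < b ∧ ws.any (fun w => PySem.Str.isIn w content) then p else b := by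
  induction ws generalizing b with
  | nil => simp
  | cons w ws ih =>
      simp only [List.map, List.foldl, pvStep, List.any_cons]
      by_cases hw : PySem.Str.isIn w content = true
      case neg =>
          rw [Bool.not_eq_true] at hw
          simp only [hw, Bool.and_false, Bool.false_or, if_false, Bool.false_eq_true]
          exact ih b
      case pos =>
          simp only [hw, Bool.and_true, Bool.true_or, decide_eq_true_eq]
          by_cases hb : p < b
          · rw [if_pos hb, pvFold_stay content p p (lt_irrefl p) ws,
              if_pos ⟨hb, trivial⟩]
          · rw [if_neg hb, ih b, if_neg (fun h => hb h.1),
              if_neg (fun h => hb h.1)]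

-- the flat map is the concatenation of its four priority groups
theorem pvKeywordPriority_eq :
    pvKeywordPriority
      = (["sequence", "interaction", "message", "actor", "participant"].map (fun w => (w, (0 : Int))))
        ++ (["class", "inheritance", "method", "attribute", "relationship"].map (fun w => (w, (1 : Int))))
        ++ (["state", "transition", "status", "condition"].map (fun w => (w, (2 : Int))))
        ++ (["gantt", "timeline", "schedule", "project", "task"].map (fun w => (w, (3 : Int)))) := rfl

-- ===== VERDICT (by name: the statement is the Claim_ definition above) =====
theorem detect_diagram_type_py_spec : Claim_equal_detect_diagram_type_py := by
  intro description instructions _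
  unfold Spec_detect_diagram_type_py detect_diagram_type_py detect_diagram_type_py_alt
  simp only [pvKeywordPriority_eq, List.foldl_append, pvFold_group]
  by_cases h0 : (["sequence", "interaction", "message", "actor", "participant"].any
      (fun w => PySem.Str.isIn w (PySem.Str.lower (description ++ " " ++ instructions)))) = true <;>
  by_cases h1 : (["class", "inheritance", "method", "attribute", "relationship"].any
      (fun w => PySem.Str.isIn w (PySem.Str.lower (description ++ " " ++ instructions)))) = true <;>
  by_cases h2 : (["state", "transition", "status", "condition"].any
      (fun w => PySem.Str.isIn w (PySem.Str.lower (description ++ " " ++ instructions)))) = true <;>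
  by_cases h3 : (["gantt", "timeline", "schedule", "project", "task"].any
      (fun w => PySem.Str.isIn w (PySem.Str.lower (description ++ " " ++ instructions)))) = true <;>
  simp only [h0, h1, h2, h3, if_true, if_false, and_true, and_false,
    Bool.false_eq_true] <;>
  norm_num [pvTypes, PySem.List.pyGet?, PySem.List.pyIdx?] <;> rfl
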